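-- pv_equiv track=rewrite | github.com/minwookkim115/Algorithm | 프로그래머스/1/134240. 푸드 파이트 대회/푸드 파이트 대회.py | solution
-- ===== SOURCE A (Python) =====
-- def solution(food):
--     answer = ''
--
--     right_answer = ''
--     for i in range(len(food) - 1, 0, -1):
--         if food[i] // 2 >= 1:
--             right_answer += str(i) * (food[i] // 2)
--
--     left_answer = ''
--     for i in range(1, len(food)):
--         if food[i] // 2 >= 1:
--             left_answer += str(i) * (food[i] // 2)
--
--     answer += left_answer + '0' + right_answer
--
--     return answer
-- ===== SOURCE B (Python) =====
-- def solution(food):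
--     parts = ['0']
--     for i in range(len(food) - 1, 0, -1):
--         b = str(i) * (food[i] // 2)
--         if b:
--             parts.insert(0, b)
--             parts.append(b)
--     return ''.join(parts)
-- ===== Notes on version B (the rewrite author's own statement) =====
-- stated objective: alternative
-- what changed: B builds the palindrome inside-out: one descending loop wraps a parts list around the central '0' (insert the block at the front, append it at the back) and joins it once, instead of A's two independent ascending and descending index scans concatenating a left and a right half string.
import Mathlib
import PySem

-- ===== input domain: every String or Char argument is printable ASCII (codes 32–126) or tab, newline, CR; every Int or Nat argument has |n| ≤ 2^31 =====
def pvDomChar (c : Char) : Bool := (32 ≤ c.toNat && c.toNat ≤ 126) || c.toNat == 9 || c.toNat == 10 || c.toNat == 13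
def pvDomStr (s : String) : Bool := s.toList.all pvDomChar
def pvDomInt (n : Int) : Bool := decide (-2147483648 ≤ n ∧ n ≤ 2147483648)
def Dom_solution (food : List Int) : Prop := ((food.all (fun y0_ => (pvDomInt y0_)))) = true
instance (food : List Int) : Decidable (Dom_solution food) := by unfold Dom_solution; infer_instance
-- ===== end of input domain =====

-- B builds the palindrome inside-out: one descending loop wraps a parts list around the central
-- '0' (insert the block at the front, append it at the back), instead of A's two independent ascending/descending half scans.

-- ===== PORT A =====
-- A's loop body: if food[i] // 2 >= 1: acc += str(i) * (food[i] // 2)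
def solStep (food : List Int) (acc : List Char) (i : Int) : List Char :=
  if 1 ≤ PySem.Int.floordiv (PySem.List.pyGetD food i 0) 2 then
    acc ++ PySem.List.pyRepeat (PySem.Int.toChars i) (PySem.Int.floordiv (PySem.List.pyGetD food i 0) 2)
  else acc

def solution (food : List Int) : String :=
  let right_answer : List Char :=
    (PySem.List.pyRange ((PySem.List.len food : Int) - 1) 0 (-1)).foldl (solStep food) []
  let left_answer : List Char :=
    (PySem.List.pyRange 1 (PySem.List.len food : Int) 1).foldl (solStep food) []
  String.ofList (left_answer ++ ['0'] ++ right_answer)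

-- ===== PORT B =====
-- B's loop body: b = str(i) * (food[i] // 2); if b: parts.insert(0, b); parts.append(b)
def wrapStep (food : List Int) (parts : List (List Char)) (i : Int) : List (List Char) :=
  let b := PySem.List.pyRepeat (PySem.Int.toChars i) (PySem.Int.floordiv (PySem.List.pyGetD food i 0) 2)
  if b ≠ [] then (PySem.List.insert parts 0 b) ++ [b] else parts

def solution_alt (food : List Int) : String :=
  String.ofList (PySem.Chars.join []
    ((PySem.List.pyRange ((PySem.List.len food : Int) - 1) 0 (-1)).foldl (wrapStep food) [['0']]))

-- ===== PRECONDITION & SPEC =====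
def Spec_solution (food : List Int) (out : String) : Prop := out = solution_alt food
instance (food : List Int) (out : String) : Decidable (Spec_solution food out) := by unfold Spec_solution; infer_instance

-- ===== CLAIM =====
def Claim_equal_solution : Prop := ∀ (food : List Int), Dom_solution food → Spec_solution food (solution food)

-- ===== LEMMAS AND PROOFS =====

-- the block of characters contributed by index i (empty when food[i] // 2 < 1)
def blk (food : List Int) (i : Int) : List Char :=
  PySem.List.pyRepeat (PySem.Int.toChars i) (PySem.Int.floordiv (PySem.List.pyGetD food i 0) 2)

theorem blk_eq_nil_of_lt (food : List Int) (i : Int)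
    (h : ¬ 1 ≤ PySem.Int.floordiv (PySem.List.pyGetD food i 0) 2) : blk food i = [] := by
  unfold blk
  simp only [PySem.List.pyRepeat]
  have h0 : (PySem.Int.floordiv (PySem.List.pyGetD food i 0) 2).toNat = 0 := by omega
  rw [h0]
  simp

theorem join_nil_eq_flatten (parts : List (List Char)) : PySem.Chars.join [] parts = parts.flatten := by
  induction parts with
  | nil => simp [PySem.Chars.join, List.intercalate]
  | cons h t ih => cases t <;> simp_all [PySem.Chars.join, List.intercalate, List.intersperse]

-- A's loop over any index list accumulates the flattened blocks
theorem foldl_solStep (food : List Int) (l : List Int) (acc : List Char) :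
    l.foldl (solStep food) acc = acc ++ (l.map (blk food)).flatten := by
  induction l generalizing acc with
  | nil => simp
  | cons x t ih =>
    simp only [List.foldl_cons, List.map_cons, List.flatten_cons, ih]
    unfold solStep
    split_ifs with h
    · simp [blk]
    · simp [blk_eq_nil_of_lt food x h]

-- B's wrapping loop: the flattened parts list is (reversed blocks) ++ (old parts) ++ (blocks)
theorem flatten_foldl_wrapStep (food : List Int) (l : List Int) (c : List (List Char)) :
    (l.foldl (wrapStep food) c).flatten =
      (l.map (blk food)).reverse.flatten ++ c.flatten ++ (l.map (blk food)).flatten := by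
  induction l generalizing c with
  | nil => simp
  | cons x t ih =>
    simp only [List.foldl_cons, List.map_cons, List.reverse_cons, List.flatten_append,
      List.flatten_cons, List.flatten_nil, ih]
    have hstep : (wrapStep food c x).flatten = blk food x ++ c.flatten ++ blk food x := by
      unfold wrapStep
      dsimp only
      split_ifs with h
      · rw [PySem.List.insert_zero]
        simp [blk]
      · simp only [not_not] at h
        have hb : blk food x = [] := h
        rw [hb]
        simp
    rw [hstep]
    simp

-- ===== VERDICT =====
theorem solution_spec : Claim_equal_solution := by
  intro food _
  unfold Spec_solution solution solution_alt
  have hrev : PySem.List.pyRange ((PySem.List.len food : Int) - 1) 0 (-1)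
      = (PySem.List.pyRange 1 (PySem.List.len food : Int) 1).reverse := by
    rw [PySem.List.pyRange_neg_one_eq_reverse]
    norm_num
  rw [hrev, foldl_solStep, foldl_solStep, join_nil_eq_flatten, flatten_foldl_wrapStep]
  simp
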